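-- pv_equiv track=rewrite | github.com/miliar/Code_Jam_Webscraper | solutions_python/solutions_year17_round0_nr2/463.py | palier
-- ===== SOURCE A (Python) =====
-- def palier(s,i):
-- 	if i == len(s)-1:
-- 		return False
-- 	if int(s[i+1]) > int(s[i]):
-- 		return False
-- 	elif int(s[i+1]) < int(s[i]):
-- 		return True
-- 	else:
-- 		return palier(s,i+1)
-- ===== SOURCE B (Python) =====
-- def palier(s, i):
--     n = len(s)
--     if i != n - 1:
--         ref = int(s[i])
--         for j in range(i + 1, n):
--             d = int(s[j])
--             if d > ref:
--                 return False
--             if d < ref: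
--                 return True
--     return False
-- ===== Notes on version B (the rewrite author's own statement) =====
-- stated objective: simpler
-- what changed: Replaces A's tail recursion (which re-reads a moving reference digit s[i] at every call) by a single explicit loop over j = i+1..len(s)-1 comparing each digit with the fixed original digit s[i], valid because every skipped digit equals s[i].
import Mathlib
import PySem

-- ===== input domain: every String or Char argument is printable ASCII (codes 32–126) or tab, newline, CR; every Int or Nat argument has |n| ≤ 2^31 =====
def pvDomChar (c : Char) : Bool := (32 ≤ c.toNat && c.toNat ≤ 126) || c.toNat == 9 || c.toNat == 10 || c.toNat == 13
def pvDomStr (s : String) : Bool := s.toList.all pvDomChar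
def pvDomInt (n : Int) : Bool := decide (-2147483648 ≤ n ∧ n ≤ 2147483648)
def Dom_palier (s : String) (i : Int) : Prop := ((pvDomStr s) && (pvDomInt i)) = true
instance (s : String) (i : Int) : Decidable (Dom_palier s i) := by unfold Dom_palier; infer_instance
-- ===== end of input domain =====

-- B replaces A's tail recursion (moving reference digit) by a single loop over j = i+1..len-1
-- comparing each digit with the fixed original digit s[i]; objective: simpler decomposition, same cost.

-- shared primitive: int(c) for a single printable-ASCII character; exact on that domain
-- (a single ASCII char parses as an int iff it is '0'..'9'; all other single ASCII chars raise ValueError)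
def digitVal? (c : Char) : Option Int :=
  if c.isDigit then some ((c.toNat : Int) - 48) else none

-- ===== PORT A =====
-- fuel-based transliteration of the tail recursion; fuel only makes it total
-- (2*len+2 steps always suffice before the recursion returns or raises; none-cases = exceptions)
def palierAuxA (l : List Char) (fuel : Nat) (i : Int) : Bool :=
  match fuel with
  | 0 => false
  | fuel + 1 =>
    if i = (l.length : Int) - 1 then false
    else
      match (PySem.List.pyGet? l (i+1)).bind digitVal?, (PySem.List.pyGet? l i).bind digitVal? with
      | some d, some c => if d > c then false else if d < c then true else palierAuxA l fuel (i+1)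
      | _, _ => false

def palier (s : String) (i : Int) : Bool :=
  palierAuxA s.toList (2 * s.toList.length + 2) i

-- ===== PORT B =====
-- the for-loop over range(i+1, n) with its early returns, as structural recursion on the index list
def palierAuxB (l : List Char) (ref : Int) : List Int → Bool
  | [] => false
  | j :: js =>
    match (PySem.List.pyGet? l j).bind digitVal? with
    | none => false
    | some d => if d > ref then false else if d < ref then true else palierAuxB l ref js

def palier_alt (s : String) (i : Int) : Bool :=
  let l := s.toList
  let n : Int := l.length
  if i ≠ n - 1 then
    match (PySem.List.pyGet? l i).bind digitVal? with
    | none => false  -- int(s[i]) raises here (outside Pre_)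
    | some ref => palierAuxB l ref (PySem.List.pyRange (i+1) n 1)
  else false

-- ===== PRECONDITION & SPEC =====
-- Pre_ is exactly the set of inputs on which the Python A returns normally: either i is the
-- last index, or i is a valid (possibly negative) index and every character from position i up
-- to (and including) the first one differing from s[i] is a digit; elsewhere A raises
-- IndexError or ValueError.
def pvVisit (l : List Char) (i : Int) : List Char :=
  if 0 ≤ i then l.drop i.toNat else l.drop (i + l.length).toNat ++ l

def pvChainOK : List Char → Bool
  | [] => false
  | c :: rest => c.isDigit &&
      (match rest.dropWhile (· == c) with
       | [] => true
       | d :: _ => d.isDigit)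

def Pre_palier (s : String) (i : Int) : Prop :=
  i = (s.toList.length : Int) - 1 ∨
  (-(s.toList.length : Int) ≤ i ∧ i < (s.toList.length : Int) - 1 ∧
    pvChainOK (pvVisit s.toList i) = true)
instance (s : String) (i : Int) : Decidable (Pre_palier s i) := by unfold Pre_palier; infer_instance

def pvWitness_palier : String × Int := ("3321", 0)

def Spec_palier (s : String) (i : Int) (out : Bool) : Prop := out = palier_alt s i
instance (s : String) (i : Int) (out : Bool) : Decidable (Spec_palier s i out) := by unfold Spec_palier; infer_instance

-- ===== CLAIM (what is proved, stated in full; the proofs are below) =====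
def Claim_equal_palier : Prop := ∀ (s : String) (i : Int), Dom_palier s i → Pre_palier s i → Spec_palier s i (palier s i)

-- ===== LEMMAS AND PROOFS =====

-- core invariant: once int(s[i]) is known to be ref, A's recursion from i equals B's loop
-- over range(i+1, n) with fixed reference ref (the skipped digits all equal ref)
theorem palierAux_agree (l : List Char) (fuel : Nat) (i ref : Int)
    (hfuel : ((l.length : Int) - 1 - i).toNat < fuel)
    (href : (PySem.List.pyGet? l i).bind digitVal? = some ref) :
    palierAuxA l fuel i = palierAuxB l ref (PySem.List.pyRange (i+1) (l.length : Int) 1) := by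
  induction fuel generalizing i ref with
  | zero => omega
  | succ fuel ih =>
    have hin : PySem.Raise.InRange l.length i := by
      by_contra h
      rw [(PySem.List.pyGet?_eq_none_iff l i).mpr h] at href
      simp at href
    obtain ⟨hge, hi_lt⟩ : -(l.length : Int) ≤ i ∧ i < (l.length : Int) := by
      simpa [PySem.Raise.InRange] using hin
    by_cases hlast : i = (l.length : Int) - 1
    · subst hlast
      rw [PySem.List.pyRange_one_eq_nil (by omega)]
      simp [palierAuxA, palierAuxB]
    · have hlt : i < (l.length : Int) - 1 := by omega
      rw [PySem.List.pyRange_one_cons (by omega)]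
      unfold palierAuxA
      simp only [if_neg hlast]
      rcases hnext : (PySem.List.pyGet? l (i+1)).bind digitVal? with _ | d
      · simp [palierAuxB, hnext]
      · rw [href]
        unfold palierAuxB
        rw [hnext]
        by_cases hgt : d > ref
        · simp [hgt]
        · by_cases hltd : d < ref
          · simp [hgt, hltd]
          · have hde : d = ref := by omega
            simp only [if_neg hgt, if_neg hltd]
            subst hde
            exact ih (i+1) d (by omega) hnext

theorem palier_eq_alt (s : String) (i : Int) : palier s i = palier_alt s i := by
  unfold palier palier_alt
  set l := s.toList with hl
  simp only []
  by_cases hlast : i = (l.length : Int) - 1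
  · rw [if_neg (by simpa using hlast)]
    subst hlast
    unfold palierAuxA
    simp
  · rw [if_pos (by simpa using hlast)]
    rcases href : (PySem.List.pyGet? l i).bind digitVal? with _ | ref
    · -- int(s[i]) fails: A returns false at the first step too
      unfold palierAuxA
      simp only [if_neg hlast]
      rcases hn : (PySem.List.pyGet? l (i+1)).bind digitVal? with _ | d
      · rfl
      · simp [href]
    · have hin : PySem.Raise.InRange l.length i := by
        by_contra h
        rw [(PySem.List.pyGet?_eq_none_iff l i).mpr h] at href
        simp at href
      obtain ⟨hge, hi_lt⟩ : -(l.length : Int) ≤ i ∧ i < (l.length : Int) := by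
        simpa [PySem.Raise.InRange] using hin
      exact palierAux_agree l (2 * l.length + 2) i ref (by omega) href

-- ===== VERDICT (by name: the statement is the Claim_ definition above) =====
theorem palier_spec : Claim_equal_palier := by
  intro s i _ _
  unfold Spec_palier
  exact palier_eq_alt s i
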